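-- pv_equiv track=rewrite | github.com/ivbachantcev/Roman | к 16.06/25_2609.py | check_div
-- ===== SOURCE A (Python) =====
-- def simple_numb(n):
--     for i in range(2, int(n**.5) + 1):
--         if n % i == 0:
--             return False
--     return True
--
-- def check_div(n):
--     for i in range(2, int(n**.5) + 1):
--         if n % i == 0:
--             if simple_numb(i):
--                 if i != n // i and simple_numb(n // i):
--                     if i % 10 == (n // i) % 10:
--                         return True
--                     else:
--                         return False
--                 else:
--                     return False
--             else:
--                 return False
--     return False
-- ===== SOURCE B (Python) =====
-- def check_div(n):
--     # Fully factor n by trial division, then check the factor multiset shape.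
--     factors = []
--     m = n
--     i = 2
--     while i * i <= m:
--         if m % i == 0:
--             factors.append(i)
--             m //= i
--         else:
--             i += 1
--     if m > 1:
--         factors.append(m)
--     return len(factors) == 2 and factors[0] != factors[1] and factors[0] % 10 == factors[1] % 10
-- ===== Notes on version B (the rewrite author's own statement) =====
-- stated objective: alternative
-- what changed: A finds the smallest divisor and then re-tests the cofactor's primality with a separate trial-division helper; B runs one full trial-division factorization collecting all prime factors into a list and decides by the list's shape (length 2, distinct, same last digit).
import Mathlib
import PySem

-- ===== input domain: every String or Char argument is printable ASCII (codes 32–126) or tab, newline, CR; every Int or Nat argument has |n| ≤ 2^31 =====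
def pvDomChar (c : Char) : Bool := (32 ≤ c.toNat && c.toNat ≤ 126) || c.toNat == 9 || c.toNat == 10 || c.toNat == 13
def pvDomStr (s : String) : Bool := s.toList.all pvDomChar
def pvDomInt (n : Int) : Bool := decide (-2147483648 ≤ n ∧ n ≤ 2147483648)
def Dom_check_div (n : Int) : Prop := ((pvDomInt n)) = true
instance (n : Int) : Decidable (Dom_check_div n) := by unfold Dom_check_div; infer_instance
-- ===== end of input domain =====

-- B replaces A's find-smallest-divisor-then-retest-cofactor nesting by one full trial-division
-- factorization followed by a shape check on the factor list (alternative decomposition, same cost).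


-- ===== PORT A =====
-- int(n**.5) for nonnegative n: floor square root (exact on 0 ≤ n ≤ 2^31, where the float sqrt
-- rounds inside the unit gap); for negative n Python's n**.5 is complex and int() raises TypeError,
-- which Pre_check_div excludes.
def pySqrtFloor (n : Int) : Int := (Nat.sqrt n.toNat : Int)

def simple_numb (n : Int) : Bool :=
  (PySem.List.pyRange 2 (pySqrtFloor n + 1) 1).all (fun i => !(PySem.Int.mod n i == 0))

def check_div_go (n : Int) : List Int → Bool
  | [] => false
  | i :: rest =>
    if PySem.Int.mod n i == 0 then
      if simple_numb i then
        if decide (i ≠ PySem.Int.floordiv n i) && simple_numb (PySem.Int.floordiv n i) then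
          PySem.Int.mod i 10 == PySem.Int.mod (PySem.Int.floordiv n i) 10
        else false
      else false
    else check_div_go n rest

def check_div (n : Int) : Bool :=
  check_div_go n (PySem.List.pyRange 2 (pySqrtFloor n + 1) 1)

-- ===== PORT B =====
-- fuel-driven transcription of B's `while i * i <= m` loop; the fuel n.toNat + 2 passed below
-- always suffices (each iteration either shrinks m or raises i), so the fuel-0 arm is never taken.
def bFactor : Nat → Int → Int → List Int → List Int × Int
  | 0, m, _, acc => (acc, m)
  | fuel + 1, m, i, acc =>
    if i * i ≤ m then
      if PySem.Int.mod m i == 0 then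
        bFactor fuel (PySem.Int.floordiv m i) i (acc ++ [i])
      else
        bFactor fuel m (i + 1) acc
    else (acc, m)

-- B's final return line: len(factors) == 2 and factors[0] != factors[1] and same last digit
def shapeCheck (factors : List Int) : Bool :=
  match factors with
  | [p, q] => decide (p ≠ q) && (PySem.Int.mod p 10 == PySem.Int.mod q 10)
  | _ => false

def check_div_alt (n : Int) : Bool :=
  let r := bFactor (n.toNat + 2) n 2 []
  shapeCheck (if r.2 > 1 then r.1 ++ [r.2] else r.1)

-- ===== PRECONDITION & SPEC =====
-- Pre_ excludes exactly the negative inputs, where A raises TypeError (int() applied to the complex value n**.5).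
def Pre_check_div (n : Int) : Prop := 0 ≤ n
instance (n : Int) : Decidable (Pre_check_div n) := by unfold Pre_check_div; infer_instance

def pvWitness_check_div : Int := 21

def Spec_check_div (n : Int) (out : Bool) : Prop := out = check_div_alt n
instance (n : Int) (out : Bool) : Decidable (Spec_check_div n out) := by unfold Spec_check_div; infer_instance

-- ===== CLAIM (what is proved, stated in full; the proofs are below) =====
def Claim_equal_check_div : Prop := ∀ (n : Int), Dom_check_div n → Pre_check_div n → Spec_check_div n (check_div n)

-- ===== LEMMAS AND PROOFS =====

-- d*d ≤ n ↔ d ≤ ⌊√n⌋, for nonnegative ints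
lemma sq_le_iff (n d : Int) (hn : 0 ≤ n) (hd : 0 ≤ d) : d * d ≤ n ↔ d ≤ pySqrtFloor n := by
  unfold pySqrtFloor
  rcases Int.eq_ofNat_of_zero_le hn with ⟨n', rfl⟩
  rcases Int.eq_ofNat_of_zero_le hd with ⟨d', rfl⟩
  have h1 : ((n' : Int)).toNat = n' := by omega
  rw [h1]
  constructor
  · intro h
    have : d' * d' ≤ n' := by exact_mod_cast h
    exact_mod_cast Nat.le_sqrt'.mpr (by nlinarith)
  · intro h
    have h2 : d' ≤ Nat.sqrt n' := by exact_mod_cast h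
    have := Nat.le_sqrt'.mp h2
    have : d' * d' ≤ n' := by nlinarith [this]
    exact_mod_cast this

-- simple_numb m = true ↔ m has no divisor d with 2 ≤ d and d*d ≤ m
lemma simple_numb_iff (m : Int) (hm : 0 ≤ m) :
    simple_numb m = true ↔ ∀ d : Int, 2 ≤ d → d * d ≤ m → PySem.Int.mod m d ≠ 0 := by
  unfold simple_numb
  rw [List.all_eq_true]
  constructor
  · intro h d hd hsq
    have hmem : d ∈ PySem.List.pyRange 2 (pySqrtFloor m + 1) 1 := by
      rw [PySem.List.mem_pyRange_one]
      have := (sq_le_iff m d hm (by omega)).1 hsq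
      omega
    have := h d hmem
    simpa using this
  · intro h x hx
    rw [PySem.List.mem_pyRange_one] at hx
    have hsq : x * x ≤ m := (sq_le_iff m x hm (by omega)).2 (by omega)
    simpa using h x hx.1 hsq

-- A's loop returns False when n has no divisor in [i, √n]
lemma go_none (n : Int) (hn : 0 ≤ n) :
    ∀ (k : Nat) (i : Int), 2 ≤ i → k = (pySqrtFloor n + 1 - i).toNat →
    (∀ d : Int, i ≤ d → d * d ≤ n → PySem.Int.mod n d ≠ 0) →
    check_div_go n (PySem.List.pyRange i (pySqrtFloor n + 1) 1) = false := by
  intro k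
  induction k with
  | zero =>
    intro i hi hk _
    rw [PySem.List.pyRange_one_eq_nil (by omega)]
    rfl
  | succ k ih =>
    intro i hi hk h
    by_cases hlt : i < pySqrtFloor n + 1
    · rw [PySem.List.pyRange_one_cons hlt]
      have hmod : PySem.Int.mod n i ≠ 0 :=
        h i le_rfl ((sq_le_iff n i hn (by omega)).2 (by omega))
      simp only [check_div_go]
      rw [if_neg (by simpa using hmod)]
      exact ih (i + 1) (by omega) (by omega) (fun d hd => h d (by omega))
    · rw [PySem.List.pyRange_one_eq_nil (by omega)]
      rfl

-- A's loop stops at the first divisor p and returns the body's value there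
lemma go_first (n : Int) (hn : 0 ≤ n) (p : Int) (hp2 : 2 ≤ p) (hpsq : p * p ≤ n)
    (hpd : PySem.Int.mod n p = 0) :
    ∀ (k : Nat) (i : Int), 2 ≤ i → i ≤ p → k = (p - i).toNat →
    (∀ d : Int, i ≤ d → d < p → PySem.Int.mod n d ≠ 0) →
    check_div_go n (PySem.List.pyRange i (pySqrtFloor n + 1) 1) =
      (if simple_numb p then
        if decide (p ≠ PySem.Int.floordiv n p) && simple_numb (PySem.Int.floordiv n p) then
          PySem.Int.mod p 10 == PySem.Int.mod (PySem.Int.floordiv n p) 10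
        else false
       else false) := by
  intro k
  induction k with
  | zero =>
    intro i hi hip hk _
    have hip' : i = p := by omega
    subst hip'
    have hlt : i < pySqrtFloor n + 1 := by
      have := (sq_le_iff n i hn (by omega)).1 hpsq
      omega
    rw [PySem.List.pyRange_one_cons hlt]
    simp only [check_div_go]
    rw [if_pos (by simpa using hpd)]
  | succ k ih =>
    intro i hi hip hk h
    have hlt : i < pySqrtFloor n + 1 := by
      have hps := (sq_le_iff n p hn (by omega)).1 hpsq
      omega
    rw [PySem.List.pyRange_one_cons hlt]
    have hmod : PySem.Int.mod n i ≠ 0 := h i le_rfl (by omega)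
    simp only [check_div_go]
    rw [if_neg (by simpa using hmod)]
    exact ih (i + 1) (by omega) (by omega) (by omega) (fun d hd => h d (by omega))

-- B's loop leaves (acc, m) untouched when m has no divisor in [i, √m] (any fuel)
lemma bFactor_none :
    ∀ (fuel : Nat) (m i : Int) (acc : List Int),
    (∀ d : Int, i ≤ d → d * d ≤ m → PySem.Int.mod m d ≠ 0) →
    bFactor fuel m i acc = (acc, m) := by
  intro fuel
  induction fuel with
  | zero => intro m i acc _; rfl
  | succ fuel ih =>
    intro m i acc h
    simp only [bFactor]
    by_cases h1 : i * i ≤ m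
    · rw [if_pos h1, if_neg (by simpa using h i le_rfl h1)]
      exact ih m (i + 1) acc (fun d hd => h d (by omega))
    · rw [if_neg h1]

-- count of factors ultimately collected, plus one for a final remainder > 1
def remInd (m : Int) : Nat := if 1 < m then 1 else 0

-- B's loop never loses collected factors nor a remainder > 1 (any fuel)
lemma bFactor_len :
    ∀ (fuel : Nat) (m i : Int) (acc : List Int), 2 ≤ i →
    acc.length + remInd m ≤ (bFactor fuel m i acc).1.length + remInd (bFactor fuel m i acc).2 := by
  intro fuel
  induction fuel with
  | zero => intro m i acc _; simp [bFactor]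
  | succ fuel ih =>
    intro m i acc hi
    simp only [bFactor]
    by_cases h1 : i * i ≤ m
    · rw [if_pos h1]
      by_cases h2 : PySem.Int.mod m i == 0
      · rw [if_pos h2]
        have hq : i ≤ PySem.Int.floordiv m i := by
          rw [PySem.Int.le_floordiv_iff_mul_le (by omega)]
          exact h1
        have := ih (PySem.Int.floordiv m i) i (acc ++ [i]) hi
        have hind : remInd (PySem.Int.floordiv m i) = 1 := by unfold remInd; rw [if_pos (by omega)]
        have hlen : (acc ++ [i]).length = acc.length + 1 := by simp
        unfold remInd at *
        split_ifs at * <;> omega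
      · rw [if_neg h2]
        exact ih m (i + 1) acc (by omega)
    · rw [if_neg h1]

-- with a divisor available and enough fuel, B collects at least two more entries in total
lemma bFactor_two :
    ∀ (fuel : Nat) (m i : Int) (acc : List Int), 2 ≤ i → (m + 2 - i).toNat ≤ fuel →
    (∃ d : Int, i ≤ d ∧ d * d ≤ m ∧ PySem.Int.mod m d = 0) →
    acc.length + 2 ≤ (bFactor fuel m i acc).1.length + remInd (bFactor fuel m i acc).2 := by
  intro fuel
  induction fuel with
  | zero =>
    intro m i acc hi hfuel ⟨d, hd1, hd2, _⟩
    exfalso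
    have h1 : i * i ≤ d * d := by nlinarith
    have h2 : i ≤ i * i := by nlinarith
    omega
  | succ fuel ih =>
    intro m i acc hi hfuel ⟨d, hd1, hd2, hd3⟩
    have hii : i * i ≤ m := by nlinarith
    have him : i ≤ m := by nlinarith
    simp only [bFactor]
    rw [if_pos hii]
    by_cases h2 : PySem.Int.mod m i == 0
    · rw [if_pos h2]
      have hq : i ≤ PySem.Int.floordiv m i := by
        rw [PySem.Int.le_floordiv_iff_mul_le (by omega)]
        exact hii
      have := bFactor_len fuel (PySem.Int.floordiv m i) i (acc ++ [i]) hi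
      have hind : remInd (PySem.Int.floordiv m i) = 1 := by unfold remInd; rw [if_pos (by omega)]
      have hlen : (acc ++ [i]).length = acc.length + 1 := by simp
      omega
    · rw [if_neg h2]
      have hdne : d ≠ i := by
        intro he
        rw [he] at hd3
        exact h2 (by simpa using hd3)
      exact ih m (i + 1) acc (by omega) (by omega) ⟨d, by omega, hd2, hd3⟩
-- B's loop skips from i up to p when nothing in [i, p) divides m, consuming p - i fuel
lemma bFactor_skip :
    ∀ (k fuel : Nat) (m i p : Int) (acc : List Int), 2 ≤ i → i ≤ p → p * p ≤ m →
    k = (p - i).toNat → k ≤ fuel →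
    (∀ d : Int, i ≤ d → d < p → PySem.Int.mod m d ≠ 0) →
    bFactor fuel m i acc = bFactor (fuel - k) m p acc := by
  intro k
  induction k with
  | zero =>
    intro fuel m i p acc _ hip _ hk _ _
    have : i = p := by omega
    subst this
    simp
  | succ k ih =>
    intro fuel m i p acc hi hip hpm hk hkf h
    obtain ⟨f, rfl⟩ : ∃ f, fuel = f + 1 := ⟨fuel - 1, by omega⟩
    have hilt : i < p := by omega
    have hii : i * i ≤ m := by nlinarith
    simp only [bFactor]
    rw [if_pos hii, if_neg (by simpa using h i le_rfl hilt)]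
    rw [ih f m (i + 1) p acc (by omega) (by omega) hpm (by omega) (by omega)
      (fun d hd => h d (by omega))]
    congr 1
    omega

-- a factor list whose length is not 2 fails B's shape check
lemma shapeCheck_len (l : List Int) (h : l.length ≠ 2) : shapeCheck l = false := by
  rcases l with _ | ⟨a, _ | ⟨b, _ | ⟨c, t⟩⟩⟩ <;> simp [shapeCheck] at h ⊢


-- ===== VERDICT (by name: the statement is the Claim_ definition above) =====
theorem check_div_spec : Claim_equal_check_div := by
  intro n _ hpre
  unfold Pre_check_div at hpre
  unfold Spec_check_div check_div check_div_alt
  by_cases hND : ∀ d : Int, 2 ≤ d → d * d ≤ n → PySem.Int.mod n d ≠ 0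
  · -- no divisor at all: A's loop finds nothing, B factors nothing
    rw [go_none n hpre _ 2 le_rfl rfl hND, bFactor_none _ n 2 [] hND]
    by_cases hn1 : (1:Int) < n <;> simp [hn1, shapeCheck_len]
  · push_neg at hND
    obtain ⟨d0, hd0a, hd0b, hd0c⟩ := hND
    -- the least divisor p of n with 2 ≤ p and p*p ≤ n
    have hex : ∃ k : Nat, 2 ≤ (k : Int) ∧ (k : Int) * (k : Int) ≤ n ∧ PySem.Int.mod n (k : Int) = 0 := by
      refine ⟨d0.toNat, ?_, ?_, ?_⟩ <;> rw [Int.toNat_of_nonneg (by omega : (0:Int) ≤ d0)] <;>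
        first | omega | assumption
    set p : Int := (Nat.find hex : Int) with hpdef
    obtain ⟨hp2, hpsq, hpd⟩ := Nat.find_spec hex
    rw [← hpdef] at hp2 hpsq hpd
    have hpmin : ∀ d : Int, 2 ≤ d → d < p → d * d ≤ n → PySem.Int.mod n d ≠ 0 := by
      intro d h2 hdp hsq hmod
      have hlt : d.toNat < Nat.find hex := by omega
      refine Nat.find_min hex hlt ⟨?_, ?_, ?_⟩ <;>
        rw [Int.toNat_of_nonneg (by omega : (0:Int) ≤ d)] <;> first | omega | assumption
    have hpn : p ≤ n := by nlinarith
    have hpdvd : p ∣ n := (PySem.Int.mod_eq_zero_iff_dvd n p).1 hpd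
    set q : Int := PySem.Int.floordiv n p with hqdef
    have hqe : q = n / p := by rw [hqdef, PySem.Int.floordiv_eq_ediv_of_pos (by omega)]
    have hmul : p * q = n := by rw [hqe]; exact Int.mul_ediv_cancel' hpdvd
    have hqp : p ≤ q := by rw [hqdef, PySem.Int.le_floordiv_iff_mul_le (by omega)]; exact hpsq
    have hq1 : 1 < q := by omega
    have hqn : q ≤ n := by nlinarith
    have hqdvd : q ∣ n := ⟨p, by rw [← hmul]; ring⟩
    -- any divisor d of q with 2 ≤ d, d*d ≤ q is ≥ p (else it would beat p's minimality in n)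
    have htrans : ∀ d : Int, 2 ≤ d → d * d ≤ q → PySem.Int.mod q d = 0 → p ≤ d := by
      intro d h2 hsq hmod
      by_contra hlt
      push_neg at hlt
      have hdn : d ∣ n := ((PySem.Int.mod_eq_zero_iff_dvd q d).1 hmod).trans hqdvd
      exact hpmin d h2 hlt (by nlinarith) ((PySem.Int.mod_eq_zero_iff_dvd n d).2 hdn)
    -- simple_numb p is true: p is the least divisor of n
    have hsp : simple_numb p = true := by
      rw [simple_numb_iff p (by omega)]
      intro d h2 hsq hmod
      have hdp : d ∣ p := (PySem.Int.mod_eq_zero_iff_dvd p d).1 hmod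
      have hdlt : d < p := by nlinarith
      exact hpmin d h2 hdlt (by nlinarith)
        ((PySem.Int.mod_eq_zero_iff_dvd n d).2 (hdp.trans hpdvd))
    -- A's loop stops at p
    rw [go_first n hpre p hp2 hpsq hpd _ 2 le_rfl hp2 rfl
      (fun d hd hdp => hpmin d hd hdp (by nlinarith))]
    rw [hsp, ← hqdef]
    -- B's loop: skip from 2 up to p, then divide once
    have hfuel : (p - 2).toNat ≤ n.toNat + 2 := by omega
    rw [bFactor_skip (p - 2).toNat (n.toNat + 2) n 2 p [] le_rfl hp2 hpsq rfl hfuel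
      (fun d hd hdp => hpmin d hd hdp (by nlinarith))]
    obtain ⟨f, hf⟩ : ∃ f, n.toNat + 2 - (p - 2).toNat = f + 1 :=
      ⟨n.toNat + 1 - (p - 2).toNat, by omega⟩
    have hcond : (PySem.Int.mod n p == 0) = true := by simpa using hpd
    have hstep : bFactor (f + 1) n p [] = bFactor f q p [p] := by
      simp only [bFactor]
      rw [if_pos hpsq, if_pos hcond, List.nil_append, ← hqdef]
    rw [hf, hstep]
    have hff : (q + 2 - p).toNat ≤ f := by omega
    by_cases hQ : ∃ d : Int, p ≤ d ∧ d * d ≤ q ∧ PySem.Int.mod q d = 0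
    · -- the cofactor q is composite: both sides are False
      have hsq : simple_numb q = false := by
        obtain ⟨d, hda, hdb, hdc⟩ := hQ
        rw [← Bool.not_eq_true, simple_numb_iff q (by omega)]
        push_neg
        exact ⟨d, by omega, hdb, hdc⟩
      rw [hsq]
      have h3 := bFactor_two f q p [p] hp2 hff hQ
      set r := bFactor f q p [p] with hr
      have hlen : (if r.2 > 1 then r.1 ++ [r.2] else r.1).length ≠ 2 := by
        by_cases hr2 : r.2 > 1
        · rw [if_pos hr2]
          have hone : remInd r.2 = 1 := by unfold remInd; rw [if_pos (by omega)]
          rw [hone] at h3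
          simp only [List.length_append, List.length_cons, List.length_nil] at h3 ⊢
          omega
        · rw [if_neg hr2]
          have hzero : remInd r.2 = 0 := by unfold remInd; rw [if_neg (by omega)]
          rw [hzero] at h3
          simp only [List.length_cons, List.length_nil] at h3
          omega
      rw [shapeCheck_len _ hlen]
      simp
    · -- q has no divisor ≥ p (hence none at all): B ends with factors [p, q]
      push_neg at hQ
      rw [bFactor_none f q p [p] (fun d hd1 hd2 hd3 => hQ d hd1 hd2 hd3)]
      have hsq2 : simple_numb q = true := by
        rw [simple_numb_iff q (by omega)]
        intro d h2 hsq hmod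
        exact hQ d (htrans d h2 hsq hmod) hsq hmod
      rw [hsq2]
      by_cases hpq : p = q <;> simp [shapeCheck, hpq, hq1]
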